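-- pv_equiv track=rewrite | github.com/linhlvit/ubck_atomic_design | Silver/lld/scripts/aggregate_silver.py | sort_entity_groups
-- ===== SOURCE A (Python) =====
-- SHARED_ENTITIES = {
--     "Involved Party Postal Address",
--     "Involved Party Electronic Address",
--     "Involved Party Alternative Identification",
-- }
--
-- BCO_ORDER = [
--     "Arrangement",
--     "Business Activity",
--     "Communication",
--     "Condition",
--     "Documentation",
--     "Event",
--     "Involved Party",
--     "Location",
--     "Transaction",
-- ]
--
-- def bco_sort_key(bco: str) -> int:
--     try:
--         return BCO_ORDER.index(bco)
--     except ValueError: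
--         return len(BCO_ORDER)
--
-- def sort_entity_groups(entity_groups: dict) -> list:
--     non_shared = sorted(
--         [k for k in entity_groups if k[1] not in SHARED_ENTITIES],
--         key=lambda k: (bco_sort_key(k[0]), k[1])
--     )
--     shared = sorted(
--         [k for k in entity_groups if k[1] in SHARED_ENTITIES],
--         key=lambda k: (bco_sort_key(k[0]), k[1])
--     )
--     result = []
--     for key in non_shared + shared:
--         result.extend(entity_groups[key])
--     return result
-- ===== SOURCE B (Python) =====
-- SHARED_ENTITIES = {
--     "Involved Party Postal Address",
--     "Involved Party Electronic Address",
--     "Involved Party Alternative Identification",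
-- }
--
-- BCO_ORDER = [
--     "Arrangement",
--     "Business Activity",
--     "Communication",
--     "Condition",
--     "Documentation",
--     "Event",
--     "Involved Party",
--     "Location",
--     "Transaction",
-- ]
--
-- def bco_sort_key(bco: str) -> int:
--     try:
--         return BCO_ORDER.index(bco)
--     except ValueError:
--         return len(BCO_ORDER)
--
-- def sort_entity_groups(entity_groups: dict) -> list:
--     # one keyed sort over the items (shared groups pushed after all non-shared
--     # ones by an offset of 10 > every bco rank), then one flatten; no dict lookup
--     ordered = sorted(
--         entity_groups.items(),
--         key=lambda item: (10 * (item[0][1] in SHARED_ENTITIES) + bco_sort_key(item[0][0]), item[0][1]),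
--     )
--     return [value for _, values in ordered for value in values]
-- ===== Notes on version B (the rewrite author's own statement) =====
-- stated objective: simpler
-- what changed: A partitions the keys into non-shared and shared, sorts each partition, then walks the concatenation doing a dict lookup per key; B does one stable sort of the items with a composite key (shared-offset rank, entity name) and flattens the sorted values directly, removing both the partition pass and every lookup.
import Mathlib
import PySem

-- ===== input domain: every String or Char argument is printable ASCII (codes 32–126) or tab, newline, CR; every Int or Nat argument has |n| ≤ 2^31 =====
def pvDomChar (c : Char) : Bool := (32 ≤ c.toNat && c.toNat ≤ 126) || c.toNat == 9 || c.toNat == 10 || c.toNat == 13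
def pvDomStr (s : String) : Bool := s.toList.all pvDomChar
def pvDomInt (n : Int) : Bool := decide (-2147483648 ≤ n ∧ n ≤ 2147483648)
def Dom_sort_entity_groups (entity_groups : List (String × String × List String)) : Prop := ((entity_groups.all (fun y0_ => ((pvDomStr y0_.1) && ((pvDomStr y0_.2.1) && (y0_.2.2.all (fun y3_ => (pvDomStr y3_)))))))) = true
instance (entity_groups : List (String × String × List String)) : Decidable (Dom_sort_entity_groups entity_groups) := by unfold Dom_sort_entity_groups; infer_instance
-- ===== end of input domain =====

-- B replaces A's two partition-then-sort passes and per-key dict lookups by ONE keyed sort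
-- of the items followed by one flatten (objective: simpler). Return-value equivalence only.

-- ===== PORT A =====
def SHARED_ENTITIES : List String :=
  ["Involved Party Postal Address",
   "Involved Party Electronic Address",
   "Involved Party Alternative Identification"]

def BCO_ORDER : List String :=
  ["Arrangement", "Business Activity", "Communication", "Condition", "Documentation",
   "Event", "Involved Party", "Location", "Transaction"]

-- try: BCO_ORDER.index(bco) / except ValueError: len(BCO_ORDER)
def bco_sort_key (bco : String) : Int :=
  match PySem.List.index? BCO_ORDER bco with
  | some i => (i : Int)
  | none => (BCO_ORDER.length : Int)

-- entity_groups[key]: first-match association lookup (exact: under Pre_ every looked-up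
-- key is present, so Python's KeyError is unreachable; [] is never returned by default)
def pyDictGet (eg : List (String × String × List String)) (k : String × String) : List String :=
  match eg with
  | [] => []
  | g :: rest => if g.1 = k.1 ∧ g.2.1 = k.2 then g.2.2 else pyDictGet rest k

def sort_entity_groups (entity_groups : List (String × String × List String)) : List String :=
  let keys := entity_groups.map (fun g => (g.1, g.2.1))
  let non_shared := PySem.List.sorted2 (keys.filter (fun k => !decide (k.2 ∈ SHARED_ENTITIES)))
      (fun k => bco_sort_key k.1) (fun k => k.2)
  let shared := PySem.List.sorted2 (keys.filter (fun k => decide (k.2 ∈ SHARED_ENTITIES)))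
      (fun k => bco_sort_key k.1) (fun k => k.2)
  (non_shared ++ shared).foldl (fun acc key => acc ++ pyDictGet entity_groups key) []

-- ===== PORT B =====
def sort_entity_groups_alt (entity_groups : List (String × String × List String)) : List String :=
  let ordered := PySem.List.sorted2 entity_groups
      (fun item => 10 * (if item.2.1 ∈ SHARED_ENTITIES then (1 : Int) else 0) + bco_sort_key item.1)
      (fun item => item.2.1)
  ordered.flatMap (fun item => item.2.2)

-- ===== PRECONDITION & SPEC =====
-- Pre_ excludes association lists with duplicate (bco, entity) keys: A's parameter is a
-- Python dict, which cannot contain a duplicate key, so such lists represent no dict input.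
def Pre_sort_entity_groups (entity_groups : List (String × String × List String)) : Prop :=
  (entity_groups.map (fun g => (g.1, g.2.1))).Nodup
instance (entity_groups : List (String × String × List String)) : Decidable (Pre_sort_entity_groups entity_groups) := by unfold Pre_sort_entity_groups; infer_instance

def pvWitness_sort_entity_groups : (List (String × String × List String)) :=
  [("Event", "Thing", ["x", "y"]), ("Arrangement", "Involved Party Postal Address", ["z"])]

def Spec_sort_entity_groups (entity_groups : List (String × String × List String)) (out : List String) : Prop := out = sort_entity_groups_alt entity_groups
instance (entity_groups : List (String × String × List String)) (out : List String) : Decidable (Spec_sort_entity_groups entity_groups out) := by unfold Spec_sort_entity_groups; infer_instance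

-- ===== CLAIM (what is proved, stated in full; the proofs are below) =====
def Claim_equal_sort_entity_groups : Prop := ∀ (entity_groups : List (String × String × List String)), Dom_sort_entity_groups entity_groups → Pre_sort_entity_groups entity_groups → Spec_sort_entity_groups entity_groups (sort_entity_groups entity_groups)

-- ===== LEMMAS AND PROOFS =====

-- comparator equality along the target list lets insertBy be rewritten
theorem insertBy_congr {α : Type} (b1 b2 : α → α → Bool) (x : α) (ys : List α)
    (h : ∀ y ∈ ys, b1 x y = b2 x y) :
    PySem.List.insertBy b1 x ys = PySem.List.insertBy b2 x ys := by
  induction ys with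
  | nil => rfl
  | cons y ys ih =>
    simp only [PySem.List.insertBy, h y (by simp)]
    by_cases hb : b2 x y = true
    · simp [hb]
    · simp [hb, ih (fun z hz => h z (by simp [hz]))]

-- x goes past a prefix it never precedes
theorem insertBy_append_left {α : Type} (b : α → α → Bool) (x : α) (ys zs : List α)
    (h : ∀ y ∈ ys, b x y = false) :
    PySem.List.insertBy b x (ys ++ zs) = ys ++ PySem.List.insertBy b x zs := by
  induction ys with
  | nil => rfl
  | cons y ys ih =>
    simp only [List.cons_append, PySem.List.insertBy, h y (by simp)]
    simp [ih (fun z hz => h z (by simp [hz]))]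

-- x never enters a suffix it always precedes
theorem insertBy_append_right {α : Type} (b : α → α → Bool) (x : α) (ys zs : List α)
    (h : ∀ z ∈ zs, b x z = true) :
    PySem.List.insertBy b x (ys ++ zs) = PySem.List.insertBy b x ys ++ zs := by
  induction ys with
  | nil =>
    cases zs with
    | nil => rfl
    | cons z zs => simp [PySem.List.insertBy, h z (by simp)]
  | cons y ys ih =>
    simp only [List.cons_append, PySem.List.insertBy]
    by_cases hb : b x y = true
    · simp [hb]
    · simp [hb, ih]

-- sorted2 as the foldl of insertBy it is by definition
theorem sorted2_eq_foldl {α : Type} (xs : List α) (k1 : α → Int) (k2 : α → String) :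
    PySem.List.sorted2 xs k1 k2 false =
      xs.foldl (fun acc x => PySem.List.insertBy
        (fun a b => decide (k1 a < k1 b) || (!decide (k1 b < k1 a) && decide (k2 a < k2 b))) x acc) [] := rfl

-- the single composite-key sort splits into the two class sorts
theorem sorted2_split {α : Type} (xs : List α) (p : α → Bool) (kC kB : α → Int) (k2 : α → String)
    (hsame : ∀ a b, p a = p b → (kC a < kC b ↔ kB a < kB b))
    (hcross : ∀ a b, p a = false → p b = true → kC a < kC b) :
    PySem.List.sorted2 xs kC k2 false =
      PySem.List.sorted2 (xs.filter (fun x => !p x)) kB k2 false ++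
      PySem.List.sorted2 (xs.filter p) kB k2 false := by
  induction xs using List.reverseRecOn with
  | nil => rfl
  | append_singleton xs x ih =>
    have hmemNS : ∀ a ∈ PySem.List.sorted2 (xs.filter (fun x => !p x)) kB k2 false, p a = false := by
      intro a ha
      have := (PySem.List.sorted2_perm (xs.filter (fun x => !p x)) kB k2 false).mem_iff.mp ha
      simpa using (List.of_mem_filter this)
    have hmemSH : ∀ a ∈ PySem.List.sorted2 (xs.filter p) kB k2 false, p a = true := by
      intro a ha
      have := (PySem.List.sorted2_perm (xs.filter p) kB k2 false).mem_iff.mp ha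
      exact List.of_mem_filter this
    have hC : PySem.List.sorted2 (xs ++ [x]) kC k2 false =
        PySem.List.insertBy (fun a b => decide (kC a < kC b) || (!decide (kC b < kC a) && decide (k2 a < k2 b)))
          x (PySem.List.sorted2 xs kC k2 false) := by
      simp [sorted2_eq_foldl, List.foldl_append]
    have hB : ∀ ys : List α, PySem.List.sorted2 (ys ++ [x]) kB k2 false =
        PySem.List.insertBy (fun a b => decide (kB a < kB b) || (!decide (kB b < kB a) && decide (k2 a < k2 b)))
          x (PySem.List.sorted2 ys kB k2 false) := by
      intro ys; simp [sorted2_eq_foldl, List.foldl_append]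
    rw [hC, ih]
    by_cases hx : p x = true
    · have hfil1 : List.filter (fun y => !p y) (xs ++ [x]) = List.filter (fun y => !p y) xs := by
        simp [hx]
      have hfil2 : List.filter p (xs ++ [x]) = List.filter p xs ++ [x] := by simp [hx]
      rw [hfil1, hfil2, hB]
      rw [insertBy_append_left _ _ _ _ (by
        intro y hy
        have hy' : p y = false := hmemNS y hy
        have h1 : kC y < kC x := hcross y x hy' hx
        simp [not_lt_of_gt h1, h1])]
      congr 1
      exact insertBy_congr _ _ _ _ (by
        intro y hy
        have hy' : p y = true := hmemSH y hy
        have e1 := hsame x y (hx.trans hy'.symm)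
        have e2 := hsame y x (hy'.trans hx.symm)
        have d1 : decide (kC x < kC y) = decide (kB x < kB y) := by
          by_cases c : kB x < kB y
          · simp [c, e1.mpr c]
          · simp [c, (not_iff_not.mpr e1).mpr c]
        have d2 : decide (kC y < kC x) = decide (kB y < kB x) := by
          by_cases c : kB y < kB x
          · simp [c, e2.mpr c]
          · simp [c, (not_iff_not.mpr e2).mpr c]
        simp [d1, d2])
    · have hx' : p x = false := by simpa using hx
      have hfil1 : List.filter (fun y => !p y) (xs ++ [x]) = List.filter (fun y => !p y) xs ++ [x] := by
        simp [hx']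
      have hfil2 : List.filter p (xs ++ [x]) = List.filter p xs := by simp [hx']
      rw [hfil1, hfil2, hB]
      rw [insertBy_append_right _ _ _ _ (by
        intro y hy
        have hy' : p y = true := hmemSH y hy
        simp [hcross x y hx' hy'])]
      congr 1
      exact insertBy_congr _ _ _ _ (by
        intro y hy
        have hy' : p y = false := hmemNS y hy
        have e1 := hsame x y (hx'.trans hy'.symm)
        have e2 := hsame y x (hy'.trans hx'.symm)
        have d1 : decide (kC x < kC y) = decide (kB x < kB y) := by
          by_cases c : kB x < kB y
          · simp [c, e1.mpr c]
          · simp [c, (not_iff_not.mpr e1).mpr c]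
        have d2 : decide (kC y < kC x) = decide (kB y < kB x) := by
          by_cases c : kB y < kB x
          · simp [c, e2.mpr c]
          · simp [c, (not_iff_not.mpr e2).mpr c]
        simp [d1, d2])

-- insertBy commutes with map when the comparator factors through the map
theorem insertBy_map {α β : Type} (f : α → β) (b : β → β → Bool) (x : α) (ys : List α) :
    PySem.List.insertBy b (f x) (ys.map f) =
      (PySem.List.insertBy (fun a c => b (f a) (f c)) x ys).map f := by
  induction ys with
  | nil => rfl
  | cons y ys ih =>
    simp only [List.map_cons, PySem.List.insertBy]
    by_cases hb : b (f x) (f y) = true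
    · simp [hb]
    · simp [hb, ih]

-- sorting the mapped list = mapping the sort with composed keys
theorem sorted2_map {α β : Type} (f : α → β) (xs : List α) (k1 : β → Int) (k2 : β → String) :
    PySem.List.sorted2 (xs.map f) k1 k2 false =
      (PySem.List.sorted2 xs (fun a => k1 (f a)) (fun a => k2 (f a)) false).map f := by
  rw [sorted2_eq_foldl, sorted2_eq_foldl, List.foldl_map]
  generalize hacc : ([] : List β) = acc0
  have : ∀ (ys : List α) (acc : List α),
      List.foldl (fun acc x => PySem.List.insertBy
        (fun a b => decide (k1 a < k1 b) || (!decide (k1 b < k1 a) && decide (k2 a < k2 b))) (f x) acc)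
        (acc.map f) ys =
      (List.foldl (fun acc x => PySem.List.insertBy
        (fun a b => decide (k1 (f a) < k1 (f b)) || (!decide (k1 (f b) < k1 (f a)) && decide (k2 (f a) < k2 (f b)))) x acc)
        acc ys).map f := by
    intro ys
    induction ys with
    | nil => intro acc; rfl
    | cons y ys ih => intro acc; simp only [List.foldl_cons, insertBy_map, ih]
  subst hacc
  simpa using this xs []

theorem bco_sort_key_bounds (s : String) : 0 ≤ bco_sort_key s ∧ bco_sort_key s ≤ 9 := by
  cases h : PySem.List.index? BCO_ORDER s with
  | none =>
    simp only [PySem.List.index?, BCO_ORDER] at h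
    simp [bco_sort_key, PySem.List.index?, BCO_ORDER, h]
  | some i =>
    obtain ⟨hlt, -⟩ := List.idxOf?_eq_some_iff.mp (by simpa [PySem.List.index?] using h)
    simp only [BCO_ORDER, List.length_cons, List.length_nil] at hlt
    simp only [bco_sort_key, h]
    exact ⟨by positivity, by omega⟩

-- first-match lookup of a member's key returns its value, given key-nodup
theorem pyDictGet_mem (eg : List (String × String × List String))
    (hnd : (eg.map (fun g => (g.1, g.2.1))).Nodup)
    (g : String × String × List String) (hg : g ∈ eg) :
    pyDictGet eg (g.1, g.2.1) = g.2.2 := by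
  induction eg with
  | nil => cases hg
  | cons h rest ih =>
    simp only [List.map_cons, List.nodup_cons] at hnd
    rcases List.mem_cons.mp hg with rfl | hg'
    · simp [pyDictGet]
    · simp only [pyDictGet]
      by_cases hk : h.1 = g.1 ∧ h.2.1 = g.2.1
      · exfalso
        exact hnd.1 (by
          rw [hk.1, hk.2]
          exact List.mem_map.mpr ⟨g, hg', rfl⟩)
      · simp [hk, ih hnd.2 hg']

-- ===== VERDICT (by name: the statement is the Claim_ definition above) =====
theorem sort_entity_groups_spec : Claim_equal_sort_entity_groups := by
  intro eg _ hpre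
  unfold Spec_sort_entity_groups sort_entity_groups sort_entity_groups_alt
  simp only []
  -- B's one sort splits into A's two sorts
  rw [sorted2_split eg (fun g => decide (g.2.1 ∈ SHARED_ENTITIES))
        (fun item => 10 * (if item.2.1 ∈ SHARED_ENTITIES then (1 : Int) else 0) + bco_sort_key item.1)
        (fun g => bco_sort_key g.1) (fun g => g.2.1)
        (by
          intro a b hab
          by_cases ha : a.2.1 ∈ SHARED_ENTITIES <;> by_cases hb : b.2.1 ∈ SHARED_ENTITIES
          · simp [ha, hb]
          · simp [ha, hb] at hab
          · simp [ha, hb] at hab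
          · simp [ha, hb])
        (by
          intro a b ha hb
          have h1 := bco_sort_key_bounds a.1
          have h2 := bco_sort_key_bounds b.1
          simp only [decide_eq_false_iff_not, decide_eq_true_eq] at ha hb
          simp [ha, hb]; omega)]
  -- A's key lists are mapped item lists
  have hfNS : (eg.map (fun g => (g.1, g.2.1))).filter (fun k => !decide (k.2 ∈ SHARED_ENTITIES)) =
      (eg.filter (fun g => !decide (g.2.1 ∈ SHARED_ENTITIES))).map (fun g => (g.1, g.2.1)) := by
    rw [List.filter_map]; rfl
  have hfSH : (eg.map (fun g => (g.1, g.2.1))).filter (fun k => decide (k.2 ∈ SHARED_ENTITIES)) =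
      (eg.filter (fun g => decide (g.2.1 ∈ SHARED_ENTITIES))).map (fun g => (g.1, g.2.1)) := by
    rw [List.filter_map]; rfl
  rw [hfNS, hfSH, sorted2_map, sorted2_map, ← List.map_append]
  -- A's loop of appends is a flatMap of lookups
  rw [← List.flatMap_eq_foldl, List.flatMap_map]
  -- lookups return the paired values
  apply List.flatMap_congr
  intro g hg
  have hgmem : g ∈ eg := by
    rcases List.mem_append.mp hg with h | h
    · exact List.mem_of_mem_filter ((PySem.List.sorted2_perm _ _ _ _).mem_iff.mp h)
    · exact List.mem_of_mem_filter ((PySem.List.sorted2_perm _ _ _ _).mem_iff.mp h)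
  exact pyDictGet_mem eg hpre g hgmem
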